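-- pv_equiv track=rewrite | github.com/idank/explainshell | explainshell/diff.py | _fmt_value
-- ===== SOURCE A (Python) =====
-- _RESET = "\033[0m"
--
-- def _fmt_value(val: object, indent: str, color: str) -> str:
--     s = str(val)
--     lines = s.split("\n")
--     if len(lines) == 1:
--         return f"{color}{indent}{s}{_RESET}"
--     out = [f"{color}{indent}{lines[0]}"]
--     for line in lines[1:]:
--         out.append(f"{indent}  {line}")
--     out[-1] += _RESET
--     return "\n".join(out)
-- ===== SOURCE B (Python) =====
-- _RESET = "\033[0m"
--
-- def _fmt_value(val: object, indent: str, color: str) -> str: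
--     s = str(val)
--     return f"{color}{indent}" + s.replace("\n", "\n" + indent + "  ") + _RESET
-- ===== Notes on version B (the rewrite author's own statement) =====
-- stated objective: simpler
-- what changed: Replaces the split/branch/per-line-loop/join pipeline with one str.replace that substitutes each newline by newline+indent+two spaces, prefixing color+indent and appending RESET once.
import Mathlib
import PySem

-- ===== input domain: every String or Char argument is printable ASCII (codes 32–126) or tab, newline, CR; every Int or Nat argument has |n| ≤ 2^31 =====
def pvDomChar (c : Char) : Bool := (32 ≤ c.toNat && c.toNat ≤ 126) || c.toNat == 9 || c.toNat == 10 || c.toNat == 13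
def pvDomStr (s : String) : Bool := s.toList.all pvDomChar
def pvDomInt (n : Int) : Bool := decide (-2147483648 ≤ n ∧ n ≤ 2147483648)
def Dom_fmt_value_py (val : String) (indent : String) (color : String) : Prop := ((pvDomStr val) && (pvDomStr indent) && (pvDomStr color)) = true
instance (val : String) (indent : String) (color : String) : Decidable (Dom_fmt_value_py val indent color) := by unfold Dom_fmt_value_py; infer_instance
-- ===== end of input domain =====

-- B replaces A's split/branch/per-line-loop/join with a single newline substitution; objective: simpler.

def pvRESET : List Char := ['\x1b', '[', '0', 'm']

-- ===== PORT A =====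
-- works over code points (List Char); exact for str arguments
def fmt_value_py (val : String) (indent : String) (color : String) : String :=
  let s := val.toList
  let lines := PySem.Chars.splitOn s ['\n']
  if lines.length = 1 then
    String.mk (color.toList ++ indent.toList ++ s ++ pvRESET)
  else
    let out := (color.toList ++ indent.toList ++ lines.head!) ::
      lines.tail.map (fun line => indent.toList ++ [' ', ' '] ++ line)
    let out := out.dropLast ++ [out.getLast! ++ pvRESET]   -- out[-1] += _RESET
    String.mk (PySem.Chars.join ['\n'] out)

-- ===== PORT B =====
def fmt_value_py_alt (val : String) (indent : String) (color : String) : String :=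
  String.mk (color.toList ++ indent.toList ++
    PySem.Chars.replace val.toList ['\n'] ('\n' :: (indent.toList ++ [' ', ' '])) ++ pvRESET)

-- ===== PRECONDITION & SPEC =====
def Spec_fmt_value_py (val : String) (indent : String) (color : String) (out : String) : Prop := out = fmt_value_py_alt val indent color
instance (val : String) (indent : String) (color : String) (out : String) : Decidable (Spec_fmt_value_py val indent color out) := by unfold Spec_fmt_value_py; infer_instance

-- ===== CLAIM (what is proved, stated in full; the proofs are below) =====
def Claim_equal_fmt_value_py : Prop := ∀ (val : String) (indent : String) (color : String), Dom_fmt_value_py val indent color → Spec_fmt_value_py val indent color (fmt_value_py val indent color)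

-- ===== LEMMAS AND PROOFS =====

/-- prepend to the head piece (head of `[]` treated as making a singleton) -/
def pvConsHead (p : List Char) : List (List Char) → List (List Char)
  | [] => [p]
  | q :: qs => (p ++ q) :: qs

/-- structural form of `s.split("\n")` -/
def pvSplit : List Char → List (List Char)
  | [] => [[]]
  | c :: t => if c = '\n' then [] :: pvSplit t else pvConsHead [c] (pvSplit t)

/-- structural form of `s.replace("\n", new)` -/
def pvRepl (new : List Char) : List Char → List Char
  | [] => []
  | c :: t => if c = '\n' then new ++ pvRepl new t else c :: pvRepl new t

theorem pvSplit_ne_nil (l : List Char) : pvSplit l ≠ [] := by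
  cases l with
  | nil => simp [pvSplit]
  | cons c t =>
    simp only [pvSplit]
    split
    · simp
    · cases h : pvSplit t <;> simp [pvConsHead]

theorem pvConsHead_nil (l : List (List Char)) (h : l ≠ []) : pvConsHead [] l = l := by
  cases l with
  | nil => exact absurd rfl h
  | cons q qs => simp [pvConsHead]

theorem pvConsHead_consHead (a b : List Char) (l : List (List Char)) :
    pvConsHead a (pvConsHead b l) = pvConsHead (a ++ b) l := by
  cases l <;> simp [pvConsHead]

theorem splitOn_go_eq (fuel : Nat) (l cur : List Char) (acc : List (List Char))
    (h : l.length ≤ fuel) :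
    PySem.Chars.splitOn.go ['\n'] fuel l cur acc
      = acc.reverse ++ pvConsHead cur.reverse (pvSplit l) := by
  induction fuel generalizing l cur acc with
  | zero =>
    cases l with
    | nil => simp [PySem.Chars.splitOn.go, pvSplit, pvConsHead]
    | cons c t => simp at h
  | succ n ih =>
    cases l with
    | nil => simp [PySem.Chars.splitOn.go, pvSplit, pvConsHead]
    | cons c t =>
      simp only [PySem.Chars.splitOn.go, pvSplit]
      by_cases hc : c = '\n'
      · subst hc
        simp only [List.isPrefixOf, Bool.and_true, beq_self_eq_true, if_pos]
        rw [ih _ _ _ (by simpa using Nat.le_of_succ_le_succ (by simpa using h))]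
        simp only [List.reverse_nil, List.length_cons, List.length_nil, List.drop_succ_cons,
          List.drop_zero, List.reverse_cons]
        rw [pvConsHead_nil _ (pvSplit_ne_nil t)]
        simp [pvConsHead]
      · have hpre : List.isPrefixOf ['\n'] (c :: t) = false := by
          simp [List.isPrefixOf]; exact fun hh => (hc hh.symm).elim
        rw [if_neg (by simp [hpre]),
          ih _ _ _ (by simpa using Nat.le_of_succ_le_succ (by simpa using h)), if_neg hc,
          pvConsHead_consHead]
        simp

theorem splitOn_eq (l : List Char) :
    PySem.Chars.splitOn l ['\n'] = pvSplit l := by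
  unfold PySem.Chars.splitOn
  rw [splitOn_go_eq _ _ _ _ (by omega)]
  simp [pvConsHead_nil _ (pvSplit_ne_nil l)]

theorem replace_go_eq (new : List Char) (fuel : Nat) (l acc : List Char)
    (h : l.length ≤ fuel) :
    PySem.Chars.replace.go ['\n'] new fuel l acc = acc.reverse ++ pvRepl new l := by
  induction fuel generalizing l acc with
  | zero =>
    cases l with
    | nil => simp [PySem.Chars.replace.go, pvRepl]
    | cons c t => simp at h
  | succ n ih =>
    cases l with
    | nil => simp [PySem.Chars.replace.go, pvRepl]
    | cons c t =>
      simp only [PySem.Chars.replace.go, pvRepl]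
      by_cases hc : c = '\n'
      · subst hc
        simp only [List.isPrefixOf, Bool.and_true, beq_self_eq_true, if_pos]
        rw [ih _ _ (by simpa using Nat.le_of_succ_le_succ (by simpa using h))]
        simp
      · have hpre : List.isPrefixOf ['\n'] (c :: t) = false := by
          simp [List.isPrefixOf]; exact fun hh => (hc hh.symm).elim
        rw [if_neg (by simp [hpre]),
          ih _ _ (by simpa using Nat.le_of_succ_le_succ (by simpa using h)), if_neg hc]
        simp

theorem replace_eq (new : List Char) (l : List Char) :
    PySem.Chars.replace l ['\n'] new = pvRepl new l := by
  unfold PySem.Chars.replace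
  rw [if_neg (by simp), replace_go_eq _ _ _ _ (le_refl _)]
  simp

theorem join_consHead (sep p : List Char) (l : List (List Char)) :
    PySem.Chars.join sep (pvConsHead p l) = p ++ PySem.Chars.join sep l := by
  cases l with
  | nil => simp [pvConsHead, PySem.Chars.join_singleton, PySem.Chars.join_nil]
  | cons q qs =>
    cases qs with
    | nil => simp [pvConsHead, PySem.Chars.join_singleton]
    | cons r rs =>
      simp [pvConsHead, PySem.Chars.join_cons_cons, List.append_assoc]

/-- key: the replacement is the join of the split pieces by `new` -/
theorem repl_eq_join (new : List Char) (l : List Char) :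
    pvRepl new l = PySem.Chars.join new (pvSplit l) := by
  induction l with
  | nil => simp [pvRepl, pvSplit, PySem.Chars.join_singleton]
  | cons c t ih =>
    simp only [pvRepl, pvSplit]
    by_cases hc : c = '\n'
    · rw [if_pos hc, if_pos hc, ih]
      cases hs : pvSplit t with
      | nil => exact absurd hs (pvSplit_ne_nil t)
      | cons q qs => simp [PySem.Chars.join_cons_cons]
    · rw [if_neg hc, if_neg hc, join_consHead, ih]
      simp

theorem join_map_pre (pre : List Char) (tail : List (List Char)) (p0 : List Char) :
    PySem.Chars.join ['\n'] (p0 :: tail.map (fun line => pre ++ line))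
      = PySem.Chars.join ('\n' :: pre) (p0 :: tail) := by
  induction tail generalizing p0 with
  | nil => simp [PySem.Chars.join_singleton]
  | cons q qs ih =>
    rw [List.map_cons, PySem.Chars.join_cons_cons, ih (pre ++ q), PySem.Chars.join_cons_cons]
    cases qs with
    | nil => simp [PySem.Chars.join_singleton, List.append_assoc]
    | cons r rs => simp [PySem.Chars.join_cons_cons, List.append_assoc]

theorem join_append_last (sep R : List Char) (xs : List (List Char)) (h : xs ≠ []) :
    PySem.Chars.join sep (xs.dropLast ++ [xs.getLast! ++ R])
      = PySem.Chars.join sep xs ++ R := by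
  induction xs with
  | nil => exact absurd rfl h
  | cons x ys ih =>
    cases ys with
    | nil => simp [PySem.Chars.join_singleton, List.getLast!]
    | cons y zs =>
      have hstep : (x :: y :: zs).dropLast ++ [(x :: y :: zs).getLast! ++ R]
          = x :: ((y :: zs).dropLast ++ [(y :: zs).getLast! ++ R]) := by
        simp [List.getLast!]
      have hne : (y :: zs).dropLast ++ [(y :: zs).getLast! ++ R] ≠ [] := by
        intro hc
        apply_fun List.length at hc
        simp at hc
      rw [hstep]
      cases hsplit : (y :: zs).dropLast ++ [(y :: zs).getLast! ++ R] with
      | nil => exact absurd hsplit hne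
      | cons w ws =>
        rw [PySem.Chars.join_cons_cons, ← hsplit, ih (by simp),
          PySem.Chars.join_cons_cons]
        simp [List.append_assoc]

theorem pvSplit_singleton (l : List Char) (h : (pvSplit l).length = 1) :
    pvSplit l = [l] := by
  induction l with
  | nil => simp [pvSplit]
  | cons c t ih =>
    simp only [pvSplit] at h ⊢
    by_cases hc : c = '\n'
    · rw [if_pos hc] at h
      cases hs : pvSplit t with
      | nil => exact absurd hs (pvSplit_ne_nil t)
      | cons q qs => rw [hs] at h; simp at h
    · rw [if_neg hc] at h ⊢
      cases hs : pvSplit t with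
      | nil => exact absurd hs (pvSplit_ne_nil t)
      | cons q qs =>
        rw [hs] at h
        have hqs : qs = [] := by
          cases qs with
          | nil => rfl
          | cons r rs => simp [pvConsHead] at h
        subst hqs
        have ht : pvSplit t = [t] := ih (by rw [hs]; rfl)
        have hq : q = t := by
          have := hs.symm.trans ht
          simpa using this
        subst hq
        simp [pvConsHead]

-- ===== VERDICT (by name: the statement is the Claim_ definition above) =====
theorem fmt_value_py_spec : Claim_equal_fmt_value_py := by
  intro val indent color _
  unfold Spec_fmt_value_py
  simp only [fmt_value_py, fmt_value_py_alt, splitOn_eq, replace_eq]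
  rw [repl_eq_join]
  cases hs : pvSplit val.toList with
  | nil => exact absurd hs (pvSplit_ne_nil val.toList)
  | cons p0 ptail =>
    cases ptail with
    | nil =>
      rw [if_pos (by simp)]
      have hsing := pvSplit_singleton val.toList (by rw [hs]; rfl)
      have hp0 : p0 = val.toList := by
        have := hs.symm.trans hsing
        simpa using this
      simp [PySem.Chars.join_singleton, hp0]
    | cons q qs =>
      rw [if_neg (by simp)]
      have hhead : (p0 :: q :: qs).head! = p0 := rfl
      have htail : (p0 :: q :: qs).tail = q :: qs := rfl
      rw [hhead, htail, join_append_last _ _ _ (by simp), List.map_cons,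
        PySem.Chars.join_cons_cons]
      have key := join_map_pre (indent.toList ++ [' ', ' ']) (q :: qs) p0
      rw [List.map_cons, PySem.Chars.join_cons_cons] at key
      rw [← key]
      congr 1
      simp [List.append_assoc]
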